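-- pv_equiv track=rewrite | github.com/yeyujujishou19/ML-DL_MyselfCodes | LSTM_CTC/My_LSTM_CTC/train.py | decode_sparse_tensor
-- ===== SOURCE A (Python) =====
-- char_set=['0','1','2','3','4','5','6','7','8','9']
--
-- def decode_sparse_tensor(sparse_tensor):
--     decoded_indexes=list()
--     current_i=0
--     current_seq=[]
--     # i_and_index即sparse_tensor[0]也就是indices中的每个元素，i_and_index[0]即sparse_tensor[0]中每个元素属于第几号样本
--     for offset,i_and_index in enumerate(sparse_tensor[0]):
--         # i记录现在遍历到的sparse_tensor[0]元素属于第几号样本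
--         i=i_and_index[0]
--         if i!=current_i:
--             # 每次属于同一个样本的sparse_tensor[0]元素遍历完以后，decoded_indexes添加这个样本的完整current_seq
--             decoded_indexes.append(current_seq)
--             # 更新i
--             current_i=i
--             # 对这样新编号的样本建立一个新的current_seq
--             current_seq=list()
--         # current_seq记录我们现在遍历到的sparse_tensor[0]元素在这批样本中的位置(下标)
--         current_seq.append(offset)
--     # for循环遍历完以后，添加最后一个样本的current_seq到decoded_indexes，这样decoded_indexes就记录了这批样本中所有样本的current_seq
--     decoded_indexes.append(current_seq)
--     result=[]
--     # 遍历decoded_indexes，依次解码每个样本的字符串内容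
--     # 实际上decoded_indexes就是记录了一批样本中每个样本中的所有字符在这批样本中的位置(下标)
--     for index in decoded_indexes:
--         result.append(decode_a_seq(index,sparse_tensor))
--     # result记录了这批样本中每个样本的字符串内容，result的每个元素就是一个样本的字符串的内容
--     # 这个元素是一个列表，列表每个元素是一个单字符
--     return result
--
-- def decode_a_seq(indexes,spars_tensor):
--     decoded=[]
--     for m in indexes:
--         ch=char_set[spars_tensor[1][m]]
--         decoded.append(ch)
--     return decoded
-- ===== SOURCE B (Python) =====
-- char_set=['0','1','2','3','4','5','6','7','8','9']
--
-- def decode_sparse_tensor(sparse_tensor):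
--     # One fused pass over zip(indices, values): decode each character immediately
--     # and group by consecutive sample id; no offset bookkeeping, no second pass.
--     result = []
--     current_i = 0
--     current = []
--     for row, v in zip(sparse_tensor[0], sparse_tensor[1]):
--         i = row[0]
--         if i != current_i:
--             result.append(current)
--             current_i = i
--             current = []
--         current.append(char_set[v])
--     result.append(current)
--     return result
-- ===== Notes on version B (the rewrite author's own statement) =====
-- stated objective: simpler
-- what changed: One fused pass over zip(indices, values) that decodes characters immediately and groups by consecutive sample id, replacing A's two-phase design (collect offset groups, then a second pass with the decode_a_seq helper re-indexing the values list).
import Mathlib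
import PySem

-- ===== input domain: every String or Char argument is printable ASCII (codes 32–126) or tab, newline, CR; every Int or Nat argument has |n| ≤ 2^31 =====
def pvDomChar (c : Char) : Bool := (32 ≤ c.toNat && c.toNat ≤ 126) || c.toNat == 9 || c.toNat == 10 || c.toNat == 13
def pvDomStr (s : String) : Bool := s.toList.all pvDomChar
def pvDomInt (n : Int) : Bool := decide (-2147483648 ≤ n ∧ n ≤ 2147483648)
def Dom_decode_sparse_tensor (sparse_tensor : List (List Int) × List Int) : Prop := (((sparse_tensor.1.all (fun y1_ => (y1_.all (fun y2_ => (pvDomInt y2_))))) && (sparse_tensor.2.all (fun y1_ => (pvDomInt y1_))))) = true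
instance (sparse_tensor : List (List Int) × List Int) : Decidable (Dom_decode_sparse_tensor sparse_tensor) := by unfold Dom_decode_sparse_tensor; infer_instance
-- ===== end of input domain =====

-- B replaces A's two-phase design (collect offset groups, then decode each group with a
-- helper) by one fused pass over zip(indices, values) that decodes characters immediately
-- and groups by consecutive sample id; objective: simpler.

-- ===== PORT A =====
-- module constant char_set (used by both programs)
def pv_char_set : List String := ["0","1","2","3","4","5","6","7","8","9"]

-- helper decode_a_seq; char_set[spars_tensor[1][m]] is ported with pyGet? (none = IndexError,
-- excluded by Pre_); .getD defaults are never reached inside Pre_.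
def decode_a_seq (indexes : List Int) (spars_tensor : List (List Int) × List Int) : List String :=
  indexes.foldl
    (fun decoded m =>
      decoded ++ [(PySem.List.pyGet? pv_char_set ((PySem.List.pyGet? spars_tensor.2 m).getD 0)).getD ""])
    []

-- A: first loop over enumerate(sparse_tensor[0]) building (decoded_indexes, current_i, current_seq, offset),
-- final append of current_seq, then second loop mapping decode_a_seq over the groups.
def decode_sparse_tensor (sparse_tensor : List (List Int) × List Int) : List (List String) :=
  let fin :=
    sparse_tensor.1.foldl
      (fun (s : List (List Int) × Int × List Int × Int) i_and_index =>
        let i := (PySem.List.pyGet? i_and_index 0).getD 0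
        if i ≠ s.2.1 then (s.1 ++ [s.2.2.1], i, [s.2.2.2], s.2.2.2 + 1)
        else (s.1, s.2.1, s.2.2.1 ++ [s.2.2.2], s.2.2.2 + 1))
      ([], 0, [], 0)
  let decoded_indexes := fin.1 ++ [fin.2.2.1]
  decoded_indexes.foldl (fun result index => result ++ [decode_a_seq index sparse_tensor]) []

-- ===== PORT B =====
-- B: one pass over zip(indices, values) with state (result, current_i, current);
-- Python zip over two lists is List.zip (exact: truncates to the shorter list).
def decode_sparse_tensor_alt (sparse_tensor : List (List Int) × List Int) : List (List String) :=
  let fin :=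
    (sparse_tensor.1.zip sparse_tensor.2).foldl
      (fun (s : List (List String) × Int × List String) rv =>
        let i := (PySem.List.pyGet? rv.1 0).getD 0
        let ch := (PySem.List.pyGet? pv_char_set rv.2).getD ""
        if i ≠ s.2.1 then (s.1 ++ [s.2.2], i, [ch])
        else (s.1, s.2.1, s.2.2 ++ [ch]))
      ([], 0, [])
  fin.1 ++ [fin.2.2]

-- ===== PRECONDITION & SPEC =====
-- Pre_ excludes exactly the inputs on which Python A raises IndexError: an empty row in
-- sparse_tensor[0] (row[0]), fewer values than index rows (sparse_tensor[1][m]), or a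
-- decoded value outside -10..9 (char_set[v]).
def Pre_decode_sparse_tensor (sparse_tensor : List (List Int) × List Int) : Prop :=
  (∀ row ∈ sparse_tensor.1, row ≠ []) ∧
  sparse_tensor.1.length ≤ sparse_tensor.2.length ∧
  ∀ v ∈ sparse_tensor.2.take sparse_tensor.1.length, -10 ≤ v ∧ v < 10
instance (sparse_tensor : List (List Int) × List Int) : Decidable (Pre_decode_sparse_tensor sparse_tensor) := by unfold Pre_decode_sparse_tensor; infer_instance

def pvWitness_decode_sparse_tensor : (List (List Int) × List Int) := ([[0, 3], [0, 7], [1, 2]], [1, 2, 3])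

def Spec_decode_sparse_tensor (sparse_tensor : List (List Int) × List Int) (out : List (List String)) : Prop := out = decode_sparse_tensor_alt sparse_tensor
instance (sparse_tensor : List (List Int) × List Int) (out : List (List String)) : Decidable (Spec_decode_sparse_tensor sparse_tensor out) := by unfold Spec_decode_sparse_tensor; infer_instance

-- ===== CLAIM (what is proved, stated in full; the proofs are below) =====
def Claim_equal_decode_sparse_tensor : Prop := ∀ (sparse_tensor : List (List Int) × List Int), Dom_decode_sparse_tensor sparse_tensor → Pre_decode_sparse_tensor sparse_tensor → Spec_decode_sparse_tensor sparse_tensor (decode_sparse_tensor sparse_tensor)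

-- ===== LEMMAS AND PROOFS =====

-- the character B decodes at absolute offset m, as a function of the values list
def pvCh (vals : List Int) (m : Int) : String :=
  (PySem.List.pyGet? pv_char_set ((PySem.List.pyGet? vals m).getD 0)).getD ""

theorem decode_a_seq_eq_map (st : List (List Int) × List Int) (indexes : List Int) :
    decode_a_seq indexes st = indexes.map (pvCh st.2) := by
  simpa [decode_a_seq, pvCh] using
    PySem.List.foldl_append_singleton_eq_map (l := indexes)
      (f := fun m => (PySem.List.pyGet? pv_char_set ((PySem.List.pyGet? st.2 m).getD 0)).getD "")

-- second loop of A is a map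
theorem foldl_append_decode (st : List (List Int) × List Int) (gs : List (List Int)) :
    gs.foldl (fun result index => result ++ [decode_a_seq index st]) []
      = gs.map (fun index => decode_a_seq index st) := by
  simpa using PySem.List.foldl_append_singleton_eq_map (fun index => decode_a_seq index st) gs []

-- main invariant: B's fused fold over the zipped suffix tracks A's fold with groups decoded
theorem pv_fold_rel (vals : List Int) :
    ∀ (l : List (List Int)) (off : Nat), off + l.length ≤ vals.length →
    ∀ (di : List (List Int)) (ci : Int) (cs : List Int),
    (l.zip (vals.drop off)).foldl
      (fun (s : List (List String) × Int × List String) rv =>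
        let i := (PySem.List.pyGet? rv.1 0).getD 0
        let ch := (PySem.List.pyGet? pv_char_set rv.2).getD ""
        if i ≠ s.2.1 then (s.1 ++ [s.2.2], i, [ch])
        else (s.1, s.2.1, s.2.2 ++ [ch]))
      (di.map (List.map (pvCh vals)), ci, cs.map (pvCh vals))
    =
    (let fa := l.foldl
        (fun (s : List (List Int) × Int × List Int × Int) i_and_index =>
          let i := (PySem.List.pyGet? i_and_index 0).getD 0
          if i ≠ s.2.1 then (s.1 ++ [s.2.2.1], i, [s.2.2.2], s.2.2.2 + 1)
          else (s.1, s.2.1, s.2.2.1 ++ [s.2.2.2], s.2.2.2 + 1))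
        (di, ci, cs, (off : Int))
     (fa.1.map (List.map (pvCh vals)), fa.2.1, fa.2.2.1.map (pvCh vals))) := by
  intro l
  induction l with
  | nil => intro off _ di ci cs; simp
  | cons x xs ih =>
    intro off hlen di ci cs
    have hoff : off < vals.length := by simp at hlen; omega
    have hdrop : vals.drop off = vals[off] :: vals.drop (off + 1) :=
      List.drop_eq_getElem_cons hoff
    have hch : pvCh vals (off : Int) = (PySem.List.pyGet? pv_char_set vals[off]).getD "" := by
      simp [pvCh, PySem.List.pyGet?_natCast, List.getElem?_eq_getElem hoff]
    rw [hdrop]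
    simp only [List.zip_cons_cons, List.foldl_cons]
    by_cases hc : (PySem.List.pyGet? x 0).getD 0 ≠ ci
    · simp only [if_pos hc]
      have := ih (off + 1) (by simp at hlen ⊢; omega) (di ++ [cs]) ((PySem.List.pyGet? x 0).getD 0) [(off : Int)]
      simp only [List.map_append, List.map_cons, List.map_nil, hch] at this
      convert this using 3
    · simp only [if_neg hc]
      have := ih (off + 1) (by simp at hlen ⊢; omega) di ci (cs ++ [(off : Int)])
      simp only [List.map_append, List.map_cons, List.map_nil, hch] at this
      convert this using 3

-- ===== VERDICT (by name: the statement is the Claim_ definition above) =====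
theorem decode_sparse_tensor_spec : Claim_equal_decode_sparse_tensor := by
  intro st _ hpre
  obtain ⟨-, hlen, -⟩ := hpre
  show decode_sparse_tensor st = decode_sparse_tensor_alt st
  unfold decode_sparse_tensor decode_sparse_tensor_alt
  have h := pv_fold_rel st.2 st.1 0 (by simpa using hlen) [] 0 []
  simp only [List.map_nil, List.drop_zero, Nat.cast_zero] at h
  simp only [foldl_append_decode]
  rw [h]
  simp [decode_a_seq_eq_map]
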